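-- pv_equiv track=rewrite | github.com/MihailKirzhakov/discord_bot | bot/functions.py | convert_sorted_message
-- ===== SOURCE A (Python) =====
-- def convert_sorted_message(sorted_values):
--     """
--     Функция преобразует список строк, в нумерованный, отсортированный список победителей.
--
--     Parameters
--     ----------
--     sorted_values: list
--         Список строк с содержимым кнопок (ставка + тэг ника).
--
--     Returns
--     -------
--     message: str
--         Результирующая, отсортированная, пронумерованная строка
--         с переносами на новую строку с тэгами ников.
--     """
--     second_sort = list()
--     check = 0
--     for i in range(0, len(sorted_values)):
--         if 'M' in sorted_values[i]:
--             second_sort.insert(0, sorted_values[i])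
--             check += 1
--         elif 'K' in sorted_values[i]:
--             second_sort.insert(check, sorted_values[i])
--         else:
--             second_sort.append(sorted_values[i])
--     message = '\n'.join([f'{i+1}. {val}' for i, val in enumerate(second_sort)])
--     return message
-- ===== SOURCE B (Python) =====
-- def convert_sorted_message(sorted_values):
--     ms, ks, others = [], [], []
--     for val in sorted_values:
--         if 'M' in val:
--             ms.append(val)
--         elif 'K' in val:
--             ks.append(val)
--         else:
--             others.append(val)
--     ordered = ms[::-1] + ks[::-1] + others
--     return '\n'.join(f'{i+1}. {val}' for i, val in enumerate(ordered))
-- ===== Notes on version B (the rewrite author's own statement) =====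
-- stated objective: simpler
-- what changed: Replaces repeated list.insert at computed positions into one shared list with a single pass appending into three buckets (M/K/other), then concatenates reversed M, reversed K, and the rest before numbering.
import Mathlib
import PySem

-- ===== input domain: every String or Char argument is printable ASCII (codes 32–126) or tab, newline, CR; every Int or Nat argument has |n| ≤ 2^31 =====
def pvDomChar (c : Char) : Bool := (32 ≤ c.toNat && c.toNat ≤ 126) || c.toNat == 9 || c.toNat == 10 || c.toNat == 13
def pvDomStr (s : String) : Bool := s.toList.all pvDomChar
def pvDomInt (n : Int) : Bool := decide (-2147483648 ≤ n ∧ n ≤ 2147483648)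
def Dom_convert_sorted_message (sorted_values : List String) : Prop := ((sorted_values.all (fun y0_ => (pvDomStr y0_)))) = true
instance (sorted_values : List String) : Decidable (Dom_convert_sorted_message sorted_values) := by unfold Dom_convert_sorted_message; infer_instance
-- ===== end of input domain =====

-- B replaces A's positional inserts into one shared list with three appended buckets, reversed and concatenated (simpler).

-- ===== PORT A =====
-- one iteration of A's for-loop: state = (second_sort, check)
def convAStep (st : List String × Int) (v : String) : List String × Int :=
  if PySem.Str.isIn "M" v then (PySem.List.insert st.1 0 v, st.2 + 1)
  else if PySem.Str.isIn "K" v then (PySem.List.insert st.1 st.2 v, st.2)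
  else (st.1 ++ [v], st.2)

def convert_sorted_message (sorted_values : List String) : String :=
  let st := (PySem.List.pyRange 0 (PySem.List.len sorted_values) 1).foldl
    (fun st i => convAStep st (PySem.List.pyGetD sorted_values i "")) ([], 0)
  PySem.Str.join "\n" ((PySem.List.enumerate st.1).map (fun p => PySem.Int.toStr (p.1 + 1) ++ ". " ++ p.2))

-- ===== PORT B =====
-- one iteration of B's for-loop: state = (ms, ks, others), each appended at the end
def convBStep (acc : List String × List String × List String) (v : String) :
    List String × List String × List String :=
  if PySem.Str.isIn "M" v then (acc.1 ++ [v], acc.2.1, acc.2.2)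
  else if PySem.Str.isIn "K" v then (acc.1, acc.2.1 ++ [v], acc.2.2)
  else (acc.1, acc.2.1, acc.2.2 ++ [v])

def convert_sorted_message_alt (sorted_values : List String) : String :=
  let t := sorted_values.foldl convBStep ([], [], [])
  -- ms[::-1] / ks[::-1] are list reversal (PySem.List.slice?_none_none_neg_one)
  let ordered := t.1.reverse ++ t.2.1.reverse ++ t.2.2
  PySem.Str.join "\n" ((PySem.List.enumerate ordered).map (fun p => PySem.Int.toStr (p.1 + 1) ++ ". " ++ p.2))

-- ===== PRECONDITION & SPEC =====
def Spec_convert_sorted_message (sorted_values : List String) (out : String) : Prop := out = convert_sorted_message_alt sorted_values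
instance (sorted_values : List String) (out : String) : Decidable (Spec_convert_sorted_message sorted_values out) := by unfold Spec_convert_sorted_message; infer_instance

-- ===== CLAIM (what is proved, stated in full; the proofs are below) =====
def Claim_equal_convert_sorted_message : Prop := ∀ (sorted_values : List String), Dom_convert_sorted_message sorted_values → Spec_convert_sorted_message sorted_values (convert_sorted_message sorted_values)

-- ===== LEMMAS AND PROOFS =====

-- Invariant: A's state is (reverse ms ++ reverse ks ++ others, |ms|) for B's buckets.
lemma conv_loop_eq (l : List String) (ms ks os : List String) :
    l.foldl convAStep (ms.reverse ++ ks.reverse ++ os, (ms.length : Int)) =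
      (let t := l.foldl convBStep (ms, ks, os)
       (t.1.reverse ++ t.2.1.reverse ++ t.2.2, (t.1.length : Int))) := by
  induction l generalizing ms ks os with
  | nil => simp
  | cons v l ih =>
    simp only [List.foldl_cons]
    by_cases hM : PySem.Chars.isIn ['M'] v.toList = true
    · have hA : convAStep (ms.reverse ++ ks.reverse ++ os, (ms.length : Int)) v =
          ((ms ++ [v]).reverse ++ ks.reverse ++ os, ((ms ++ [v]).length : Int)) := by
        simp [convAStep, hM, PySem.List.insert_zero]
      rw [hA, ih (ms ++ [v]) ks os]
      simp [convBStep, hM]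
    · by_cases hK : PySem.Chars.isIn ['K'] v.toList = true
      · have hins : PySem.List.insert (ms.reverse ++ ks.reverse ++ os) ((ms.length : Int)) v =
            ms.reverse ++ (ks ++ [v]).reverse ++ os := by
          rw [show (ms.length : Int) = (ms.reverse.length : Int) by simp,
            PySem.List.insert_natCast _ _ _ (by simp)]
          simp
        have hA : convAStep (ms.reverse ++ ks.reverse ++ os, (ms.length : Int)) v =
            (ms.reverse ++ (ks ++ [v]).reverse ++ os, (ms.length : Int)) := by
          simp [convAStep, hM, hK]
          simpa using hins
        rw [hA, ih ms (ks ++ [v]) os]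
        simp [convBStep, hM, hK]
      · have hA : convAStep (ms.reverse ++ ks.reverse ++ os, (ms.length : Int)) v =
            (ms.reverse ++ ks.reverse ++ (os ++ [v]), (ms.length : Int)) := by
          simp [convAStep, hM, hK]
        rw [hA, ih ms ks (os ++ [v])]
        simp [convBStep, hM, hK]

-- ===== VERDICT (by name: the statement is the Claim_ definition above) =====
theorem convert_sorted_message_spec : Claim_equal_convert_sorted_message := by
  intro sorted_values _
  unfold Spec_convert_sorted_message convert_sorted_message convert_sorted_message_alt
  rw [PySem.List.foldl_pyRange_zero_pyGetD]
  have := conv_loop_eq sorted_values [] [] []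
  simp only [List.reverse_nil, List.nil_append, List.length_nil, Int.ofNat_zero] at this
  rw [this]
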